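-- pv_equiv track=rewrite | github.com/gjwhw/check_data | excact&integrity/新指标/integrity(new)/data_integrity.py | dict_data
-- ===== SOURCE A (Python) =====
-- def dict_data(datatype):
--     # 各个指标对应大写指标以及含有指标项的个数的字典如：{'epg_pm': ['EPG-PM', 10]}
--     dict_data = {'epg_pm': ['EPG-PM', 10], 'cdn_pm': ['CDN-PM', 17], 'stb_cm1': ['STB-CM1', 20], 'stb_cm2': ['STB-CM2', 5],
--                 'stb_pm_vmos': ['STB-PM-VMOS', 10], 'stb_inserv_rtsp': ['STB-INSERV-RTSP', 23], 'stb_inserv_http': ['STB-INSERV-HTTP', 17],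
--                  'stb_trans': ['STB-TRANS', 29], 'stb_pmview': ['STB-PMVIEW', 10], 'stb_mos': ['STB-MOS', 12], 'vsource_mdp': ['VSOURCE-MDP', 13],
--                  'vsource_qlt': ['VSOURCE-QLT', 32], 'iptv_link_pm': ['IPTV-LINK-PM', 5], 'iptv_view_pm': ['IPTV-VIEW-PM', 7],
--                  'iptv_user_pm': ['IPTV-USER-PM', 7], 'user_vtime': ['USER-VTIME', 6], 'iptv_liveava': ['IPTV-LIVEAVA', 6],
--                  'vsource_faults1': ['VSOURCE-FAULTS1', 11], 'vsource_faults2': ['VSOURCE-FAULTS2', 11], 'vsource_livechninfo': ['VSOURCE-LIVECHNINFO', 11],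
--                  'vsource_liveconinfo': ['VSOURCE-LIVECONINFO', 9], 'vsource_vodconinfo': ['VSOURCE-VODCONINFO', 11]}
--     # 指标对应大写 EPG-PM'
--     type_name = dict_data[datatype][0]
--     # 指标含指标项个数 10
--     type_num = dict_data[datatype][1]
--     # 指标项后缀
--     list_num = ['-001', '-002', '-003', '-004', '-005', '-006', '-007', '-008', '-009', '-010', '-011', '-012', '-013','-014', '-015', '-016', '-017',
--                 '-018', '-019', '-020', '-021', '-022', '-023', '-024', '-025', '-026', '-027', '-028', '-029', '-030', '-031', '-032', '-033', '-034',
--                 '-035', '-036', '-037', '-038', '-039']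
--     # 建立空列表，合成后使用
--     list_type = []
--     n = 1
--     for x in list_num:
--         if n <= type_num:
--             list_type.append(type_name + x)
--         n += 1
--     return list_type
-- ===== SOURCE B (Python) =====
-- def dict_data(datatype):
--     # Only the item counts are stored; the uppercase metric name is derived
--     # from the key itself (upper-case, '_' -> '-'), and suffixes are computed
--     # by zero-padded formatting instead of a hard-coded table.
--     counts = {'epg_pm': 10, 'cdn_pm': 17, 'stb_cm1': 20, 'stb_cm2': 5,
--               'stb_pm_vmos': 10, 'stb_inserv_rtsp': 23, 'stb_inserv_http': 17,
--               'stb_trans': 29, 'stb_pmview': 10, 'stb_mos': 12, 'vsource_mdp': 13,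
--               'vsource_qlt': 32, 'iptv_link_pm': 5, 'iptv_view_pm': 7,
--               'iptv_user_pm': 7, 'user_vtime': 6, 'iptv_liveava': 6,
--               'vsource_faults1': 11, 'vsource_faults2': 11, 'vsource_livechninfo': 11,
--               'vsource_liveconinfo': 9, 'vsource_vodconinfo': 11}
--     type_num = counts[datatype]
--     type_name = datatype.upper().replace('_', '-')
--     return ['%s-%03d' % (type_name, i) for i in range(1, type_num + 1)]
-- ===== Notes on version B (the rewrite author's own statement) =====
-- stated objective: simpler
-- what changed: B stores only the per-key item counts, derives the uppercase metric name by upper-casing the key and turning underscores into hyphens, and computes each suffix by zero-padded formatting over range(1, type_num+1), eliminating both the name column and the hard-coded 39-entry suffix table walked with a counter-and-guard loop.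
import Mathlib
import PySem

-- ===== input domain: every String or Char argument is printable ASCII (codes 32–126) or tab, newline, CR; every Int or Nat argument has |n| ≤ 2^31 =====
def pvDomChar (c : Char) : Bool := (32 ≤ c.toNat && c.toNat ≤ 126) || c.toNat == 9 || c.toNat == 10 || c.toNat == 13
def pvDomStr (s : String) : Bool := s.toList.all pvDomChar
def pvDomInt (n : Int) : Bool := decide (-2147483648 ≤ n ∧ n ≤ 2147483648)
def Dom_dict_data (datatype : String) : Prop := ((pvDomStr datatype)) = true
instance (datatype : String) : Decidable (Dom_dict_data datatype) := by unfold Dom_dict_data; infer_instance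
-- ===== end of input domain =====

-- B keeps only the per-key counts, derives the uppercase name from the key via upper/replace,
-- and computes each zero-padded suffix directly instead of walking a hard-coded table (objective: simpler).

-- ===== PORT A =====
-- A's in-function constants: the metric dict (insertion-ordered association list) and the hard-coded suffix table list_num
def pvConstsA : PySem.Dict String (String × Int) × List String :=
  (PySem.Dict.ofList
    [("epg_pm", ("EPG-PM", 10)), ("cdn_pm", ("CDN-PM", 17)), ("stb_cm1", ("STB-CM1", 20)), ("stb_cm2", ("STB-CM2", 5)),
     ("stb_pm_vmos", ("STB-PM-VMOS", 10)), ("stb_inserv_rtsp", ("STB-INSERV-RTSP", 23)), ("stb_inserv_http", ("STB-INSERV-HTTP", 17)),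
     ("stb_trans", ("STB-TRANS", 29)), ("stb_pmview", ("STB-PMVIEW", 10)), ("stb_mos", ("STB-MOS", 12)), ("vsource_mdp", ("VSOURCE-MDP", 13)),
     ("vsource_qlt", ("VSOURCE-QLT", 32)), ("iptv_link_pm", ("IPTV-LINK-PM", 5)), ("iptv_view_pm", ("IPTV-VIEW-PM", 7)),
     ("iptv_user_pm", ("IPTV-USER-PM", 7)), ("user_vtime", ("USER-VTIME", 6)), ("iptv_liveava", ("IPTV-LIVEAVA", 6)),
     ("vsource_faults1", ("VSOURCE-FAULTS1", 11)), ("vsource_faults2", ("VSOURCE-FAULTS2", 11)), ("vsource_livechninfo", ("VSOURCE-LIVECHNINFO", 11)),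
     ("vsource_liveconinfo", ("VSOURCE-LIVECONINFO", 9)), ("vsource_vodconinfo", ("VSOURCE-VODCONINFO", 11))],
   ["-001", "-002", "-003", "-004", "-005", "-006", "-007", "-008", "-009", "-010", "-011", "-012", "-013", "-014", "-015", "-016", "-017",
    "-018", "-019", "-020", "-021", "-022", "-023", "-024", "-025", "-026", "-027", "-028", "-029", "-030", "-031", "-032", "-033", "-034",
    "-035", "-036", "-037", "-038", "-039"])

def dict_data (datatype : String) : List String :=
  match pvConstsA.1.get? datatype with      -- dict_data[datatype]; none = KeyError, excluded by Pre_
  | none => []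
  | some (type_name, type_num) =>
    -- for x in list_num: if n <= type_num: list_type.append(type_name + x); n += 1
    (pvConstsA.2.foldl (fun (st : List String × Int) x =>
        (if st.2 ≤ type_num then st.1 ++ [String.ofList (type_name.toList ++ x.toList)] else st.1, st.2 + 1))
      ([], 1)).1

-- ===== PORT B =====
-- B's table: only the item count per key
def pvCountsB : PySem.Dict String Int :=
  PySem.Dict.ofList
    [("epg_pm", 10), ("cdn_pm", 17), ("stb_cm1", 20), ("stb_cm2", 5),
     ("stb_pm_vmos", 10), ("stb_inserv_rtsp", 23), ("stb_inserv_http", 17),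
     ("stb_trans", 29), ("stb_pmview", 10), ("stb_mos", 12), ("vsource_mdp", 13),
     ("vsource_qlt", 32), ("iptv_link_pm", 5), ("iptv_view_pm", 7),
     ("iptv_user_pm", 7), ("user_vtime", 6), ("iptv_liveava", 6),
     ("vsource_faults1", 11), ("vsource_faults2", 11), ("vsource_livechninfo", 11),
     ("vsource_liveconinfo", 9), ("vsource_vodconinfo", 11)]

-- '%03d' % i for i ≥ 0: zero-pad str(i) to width 3 (exact for the nonnegative i used here)
def pvFmt03 (i : Int) : List Char :=
  let s := PySem.Int.toChars i
  List.replicate (3 - s.length) '0' ++ s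

def dict_data_alt (datatype : String) : List String :=
  match pvCountsB.get? datatype with      -- counts[datatype]
  | none => []
  | some type_num =>
    let type_name := PySem.Str.replace (PySem.Str.upper datatype) "_" "-"
    -- ['%s-%03d' % (type_name, i) for i in range(1, type_num + 1)]
    (PySem.List.pyRange 1 (type_num + 1) 1).map
      (fun i => String.ofList (type_name.toList ++ '-' :: pvFmt03 i))

-- ===== PRECONDITION & SPEC =====
-- Pre_ excludes exactly the inputs on which A raises KeyError: datatype not a key of the dict
def Pre_dict_data (datatype : String) : Prop := (pvConstsA.1.contains datatype) = true
instance (datatype : String) : Decidable (Pre_dict_data datatype) := by unfold Pre_dict_data; infer_instance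
def pvWitness_dict_data : String := "epg_pm"

def Spec_dict_data (datatype : String) (out : List String) : Prop := out = dict_data_alt datatype
instance (datatype : String) (out : List String) : Decidable (Spec_dict_data datatype out) := by unfold Spec_dict_data; infer_instance

-- ===== CLAIM (what is proved, stated in full; the proofs are below) =====
def Claim_equal_dict_data : Prop := ∀ (datatype : String), Dom_dict_data datatype → Pre_dict_data datatype → Spec_dict_data datatype (dict_data datatype)

-- ===== LEMMAS AND PROOFS =====

-- ===== VERDICT (by name: the statement is the Claim_ definition above) =====
set_option maxHeartbeats 4000000 in
theorem dict_data_spec : Claim_equal_dict_data := by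
  intro d _ hpre
  unfold Pre_dict_data at hpre
  unfold Spec_dict_data
  have hk : d ∈ (pvConstsA.1).keys := (PySem.Dict.contains_iff_mem_keys _ _).mp hpre
  fin_cases hk <;> rfl
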